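-- pv_equiv track=rewrite | github.com/vbhavsar16/kids-story-agent.StoryDAG | app/metrics.py | missing_tokens
-- ===== SOURCE A (Python) =====
-- from typing import Dict, List
--
-- def missing_tokens(text: str, tokens: List[str]) -> List[str]:
--     low = text.lower()
--     miss = []
--     for t in tokens or []:
--         t = str(t).strip().lower()
--         if t and t not in low:
--             miss.append(t)
--     return miss
-- ===== SOURCE B (Python) =====
-- from typing import List
--
-- def missing_tokens(text: str, tokens: List[str]) -> List[str]:
--     # Single scan strategy: collect every substring of text.lower() whose length
--     # matches some token length into a set, then filter tokens by set membership.
--     low = text.lower()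
--     toks = [str(t).strip().lower() for t in (tokens or [])]
--     lens = list(dict.fromkeys(len(t) for t in toks if t))
--     n = len(low)
--     present = set()
--     for L in lens:
--         for i in range(n - L + 1):
--             present.add(low[i:i + L])
--     return [t for t in toks if t and t not in present]
-- ===== Notes on version B (the rewrite author's own statement) =====
-- stated objective: faster
-- what changed: Instead of running a substring search over the whole text for every token, B collects every substring of text.lower() whose length equals some (normalised, nonempty) token length into a set once, then answers each token by a single set-membership lookup.
import Mathlib
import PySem

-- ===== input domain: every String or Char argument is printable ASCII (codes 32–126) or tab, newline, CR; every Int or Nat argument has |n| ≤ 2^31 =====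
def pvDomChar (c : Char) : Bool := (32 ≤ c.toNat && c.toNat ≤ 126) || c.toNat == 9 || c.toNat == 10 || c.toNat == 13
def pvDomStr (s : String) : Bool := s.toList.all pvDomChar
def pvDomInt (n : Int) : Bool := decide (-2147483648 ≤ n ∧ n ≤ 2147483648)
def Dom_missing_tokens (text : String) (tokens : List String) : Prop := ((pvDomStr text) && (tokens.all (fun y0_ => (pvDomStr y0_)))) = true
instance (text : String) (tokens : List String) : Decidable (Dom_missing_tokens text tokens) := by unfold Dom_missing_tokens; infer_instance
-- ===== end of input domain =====

-- B builds the set of all substrings of text.lower() whose length matches some token length,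
-- then answers each token by one set-membership test (alternative algorithm; same return value).

-- ===== PORT A =====
-- A: loop over tokens, normalise each, append to `miss` when nonempty and not a substring of text.lower().
def missing_tokens (text : String) (tokens : List String) : List String :=
  let low := PySem.Str.lower text
  tokens.foldl (fun miss t =>
    let t' := PySem.Str.lower (PySem.Str.strip t)   -- str(t) is the identity on str
    if t' ≠ "" ∧ PySem.Str.isIn t' low = false then miss ++ [t']
    else miss) []

-- ===== PORT B =====
def missing_tokens_alt (text : String) (tokens : List String) : List String :=
  let low := PySem.Str.lower text
  let toks := tokens.map (fun t => PySem.Str.lower (PySem.Str.strip t))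
  let lens := PySem.List.dedup ((toks.filter (fun t => t ≠ "")).map (fun t => PySem.Str.len t))
  let n := PySem.Str.len low
  let present : PySem.Set String :=
    lens.foldl (fun s L =>
      (PySem.List.pyRange 0 (n - L + 1) 1).foldl
        (fun s i => PySem.Set.add s (PySem.Str.slice low (some i) (some (i + L)))) s)
      PySem.Set.empty
  toks.filter (fun t => t ≠ "" ∧ ¬ PySem.Set.contains present t)

-- ===== PRECONDITION & SPEC =====
def Spec_missing_tokens (text : String) (tokens : List String) (out : List String) : Prop := out = missing_tokens_alt text tokens
instance (text : String) (tokens : List String) (out : List String) : Decidable (Spec_missing_tokens text tokens out) := by unfold Spec_missing_tokens; infer_instance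

-- ===== CLAIM (what is proved, stated in full; the proofs are below) =====
def Claim_equal_missing_tokens : Prop := ∀ (text : String) (tokens : List String), Dom_missing_tokens text tokens → Spec_missing_tokens text tokens (missing_tokens text tokens)

-- ===== LEMMAS AND PROOFS =====

-- membership in a fold that adds f b for each element of l
theorem mem_foldl_setAdd {α β : Type} [BEq α] [LawfulBEq α] (l : List β) (f : β → α) (s : PySem.Set α) (x : α) :
    x ∈ l.foldl (fun s b => PySem.Set.add s (f b)) s ↔ x ∈ s ∨ ∃ b ∈ l, x = f b := by
  induction l generalizing s with
  | nil => simp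
  | cons b bs ih =>
      simp only [List.foldl_cons, ih, PySem.Set.mem_add, List.mem_cons]
      constructor
      · rintro (h | ⟨c, hc, rfl⟩)
        · tauto
        · exact Or.inr ⟨c, Or.inr hc, rfl⟩
      · rintro (h | ⟨c, hc | hc, rfl⟩)
        · tauto
        · tauto
        · exact Or.inr ⟨c, hc, rfl⟩

-- membership in a nested fold that adds f b c for each b in l and c in g b
theorem mem_foldl_setAddFold {α β γ : Type} [BEq α] [LawfulBEq α] (l : List β) (g : β → List γ)
    (f : β → γ → α) (s : PySem.Set α) (x : α) :
    x ∈ l.foldl (fun s b => (g b).foldl (fun s c => PySem.Set.add s (f b c)) s) s ↔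
      x ∈ s ∨ ∃ b ∈ l, ∃ c ∈ g b, x = f b c := by
  induction l generalizing s with
  | nil => simp
  | cons b bs ih =>
      simp only [List.foldl_cons, ih, mem_foldl_setAdd (g b) (f b) s x, List.mem_cons]
      constructor
      · rintro (⟨h | ⟨c, hc, rfl⟩⟩ | ⟨b', hb', c, hc, rfl⟩)
        · tauto
        · exact Or.inr ⟨b, Or.inl rfl, c, hc, rfl⟩
        · exact Or.inr ⟨b', Or.inr hb', c, hc, rfl⟩
      · rintro (h | ⟨b', hb' | hb', c, hc, rfl⟩)
        · tauto
        · subst hb'; exact Or.inl (Or.inr ⟨c, hc, rfl⟩)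
        · exact Or.inr ⟨b', hb', c, hc, rfl⟩

-- infix = some drop/take window
theorem infix_iff_drop_take {α : Type} (l1 l2 : List α) :
    l1 <:+: l2 ↔ ∃ i : Nat, i + l1.length ≤ l2.length ∧ (l2.drop i).take l1.length = l1 := by
  constructor
  · rintro ⟨pre, suf, rfl⟩
    refine ⟨pre.length, by simp, ?_⟩
    simp
  · rintro ⟨i, _, h⟩
    have h1 : l1 <+: l2.drop i := h ▸ List.take_prefix _ _
    exact h1.isInfix.trans (List.drop_suffix i l2).isInfix

-- the substring set of B contains a nonempty token (whose length was collected) iff Python's `t in low`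
theorem contains_present (low : String) (toks : List String) (t : String)
    (ht : t ∈ toks) (hne : t ≠ "") :
    PySem.Set.contains
      ((PySem.List.dedup ((toks.filter (fun u => u ≠ "")).map (fun u => PySem.Str.len u))).foldl
        (fun s L => (PySem.List.pyRange 0 (PySem.Str.len low - L + 1) 1).foldl
          (fun s i => PySem.Set.add s (PySem.Str.slice low (some i) (some (i + L)))) s)
        PySem.Set.empty) t
    = PySem.Str.isIn t low := by
  rw [PySem.Set.contains_eq_decide]
  have hmem : t ∈ (PySem.List.dedup ((toks.filter (fun u => u ≠ "")).map (fun u => PySem.Str.len u))).foldl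
        (fun s L => (PySem.List.pyRange 0 (PySem.Str.len low - L + 1) 1).foldl
          (fun s i => PySem.Set.add s (PySem.Str.slice low (some i) (some (i + L)))) s)
        PySem.Set.empty
      ↔ PySem.Str.isIn t low = true := by
    rw [mem_foldl_setAddFold]
    constructor
    · rintro (h | ⟨L, hL, i, hi, rfl⟩)
      · simp [PySem.Set.empty] at h
      · have hL0 : 0 ≤ L := by
          rw [PySem.List.mem_dedup, List.mem_map] at hL
          obtain ⟨u, _, rfl⟩ := hL
          simp only [PySem.Str.len]
          exact Int.natCast_nonneg _
        obtain ⟨hi0, _⟩ := PySem.List.mem_pyRange_one.mp hi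
        rw [PySem.Str.isIn_iff_infix, PySem.Str.toList_slice, PySem.Chars.slice_eq_listSlice,
          PySem.List.slice_toNat _ hi0 (by omega)]
        exact (List.take_prefix _ _).isInfix.trans (List.drop_suffix _ _).isInfix
    · intro h
      rw [PySem.Str.isIn_iff_infix, infix_iff_drop_take] at h
      obtain ⟨i, hlen, hslice⟩ := h
      refine Or.inr ⟨PySem.Str.len t, ?_, (i : Int), ?_, ?_⟩
      · rw [PySem.List.mem_dedup, List.mem_map]
        exact ⟨t, by simp [List.mem_filter, ht, hne], rfl⟩
      · rw [PySem.List.mem_pyRange_one]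
        refine ⟨Int.natCast_nonneg i, ?_⟩
        simp only [PySem.Str.len]
        omega
      · apply String.toList_inj.mp
        rw [PySem.Str.toList_slice, PySem.Chars.slice_eq_listSlice,
          PySem.List.slice_toNat _ (Int.natCast_nonneg i)
            (by simp only [PySem.Str.len]; omega)]
        have h1 : ((i : Int) + PySem.Str.len t).toNat - ((i : Int)).toNat = t.toList.length := by
          simp only [PySem.Str.len]
          omega
        rw [h1, Int.toNat_natCast]
        exact hslice.symm
  simp only [hmem, Bool.decide_eq_true]

theorem missing_tokens_spec : Claim_equal_missing_tokens := by
  intro text tokens _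
  show missing_tokens text tokens = missing_tokens_alt text tokens
  unfold missing_tokens missing_tokens_alt
  dsimp only
  rw [PySem.List.foldl_append_ite
        (p := fun t => PySem.Str.lower (PySem.Str.strip t) ≠ "" ∧
          PySem.Str.isIn (PySem.Str.lower (PySem.Str.strip t)) (PySem.Str.lower text) = false)
        (f := fun t => PySem.Str.lower (PySem.Str.strip t)),
      List.nil_append, List.filter_map]
  refine congrArg _ (List.filter_congr ?_)
  intro t ht
  simp only [Function.comp]
  by_cases hne : PySem.Str.lower (PySem.Str.strip t) = ""
  · simp [hne]
  · have hc := contains_present (PySem.Str.lower text)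
      (tokens.map (fun t => PySem.Str.lower (PySem.Str.strip t)))
      (PySem.Str.lower (PySem.Str.strip t)) (List.mem_map.mpr ⟨t, ht, rfl⟩) hne
    simp only [hc]
    simp [hne]
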